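-- pv_equiv track=rewrite | github.com/dhrumilp15/Puzzles | binsearch/parity_jump.py | solve
-- ===== SOURCE A (Python) =====
-- from collections import deque
--
-- def solve(nums):
--     # Write your code here
--
--     def bfs(index, nums):
--         visited = set([index])
--         queue = deque([(index, 0)])
--
--         while queue:
--             curr, length = queue.popleft()
--             possib = []
--             if 0 <= curr - nums[curr] < len(nums) and curr - nums[curr] not in visited:
--                 possib.append(curr - nums[curr])
--
--             if 0 <= curr + nums[curr] < len(nums) and curr + nums[curr] not in visited:
--                 possib.append(curr + nums[curr])
--
--             for possible in possib:
--                 if nums[possible] % 2 != nums[index] % 2: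
--                     return length +1
--                 visited.add(possible)
--                 queue.append((possible, length + 1))
--         return -1
--
--     final = [-1] * len(nums)
--     for index in range(len(nums)):
--         final[index] = bfs(index, nums)
--     return final
-- ===== SOURCE B (Python) =====
-- def solve(nums):
--     # Multi-source reverse BFS per parity over a precomputed reverse adjacency list.
--     n = len(nums)
--     rev = [[] for _ in range(n)]
--     for u in range(n):
--         for v in (u - nums[u], u + nums[u]):
--             if 0 <= v < n:
--                 rev[v].append(u)
--     ans = [-1] * n
--     for p in (0, 1):
--         frontier = [v for v in range(n) if nums[v] % 2 != p]
--         seen = [nums[v] % 2 != p for v in range(n)]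
--         level = 0
--         while frontier:
--             level += 1
--             nxt = []
--             for v in frontier:
--                 for u in rev[v]:
--                     if not seen[u] and nums[u] % 2 == p:
--                         seen[u] = True
--                         ans[u] = level
--                         nxt.append(u)
--             frontier = nxt
--     return ans
-- ===== Notes on version B (the rewrite author's own statement) =====
-- stated objective: alternative
-- what changed: Replaces the per-index forward BFS (one queue-based search from every index) by two multi-source reverse BFS passes over a precomputed reverse-edge adjacency list, one per parity, assigning all answers of a parity level by level.
import Mathlib
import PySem

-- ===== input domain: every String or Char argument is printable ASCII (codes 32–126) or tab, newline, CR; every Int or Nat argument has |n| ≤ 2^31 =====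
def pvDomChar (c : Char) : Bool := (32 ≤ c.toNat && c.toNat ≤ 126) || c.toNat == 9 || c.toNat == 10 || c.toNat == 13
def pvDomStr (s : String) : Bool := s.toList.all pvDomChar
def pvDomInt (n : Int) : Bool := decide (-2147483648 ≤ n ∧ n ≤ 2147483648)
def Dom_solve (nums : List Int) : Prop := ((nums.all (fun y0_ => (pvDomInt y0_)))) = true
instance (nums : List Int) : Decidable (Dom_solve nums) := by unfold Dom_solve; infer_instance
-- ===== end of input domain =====

-- B replaces A's per-index forward BFS by two multi-source reverse BFS passes (one per parity)
-- over a precomputed reverse adjacency list (an alternative algorithm, same return value everywhere).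


-- ===== PORT A =====
-- nums[i] for an index known to be in range (both programs only index with 0 <= i < len(nums),
-- so the getD default is never reached and the access is exact).
def nget (nums : List Int) (i : Int) : Int := (PySem.List.pyGet? nums i).getD 0

-- the two candidate jumps 'possib' collected for curr (same order as A: minus first, then plus)
def possibA (nums : List Int) (visited : PySem.Set Int) (curr : Int) : List Int :=
  (if 0 ≤ curr - nget nums curr ∧ curr - nget nums curr < (nums.length : Int) ∧
      curr - nget nums curr ∉ visited then [curr - nget nums curr] else []) ++
  (if 0 ≤ curr + nget nums curr ∧ curr + nget nums curr < (nums.length : Int) ∧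
      curr + nget nums curr ∉ visited then [curr + nget nums curr] else [])

-- 'for possible in possib: …' — may return early (some answer) or extend visited/queue
def forA (nums : List Int) (pi : Int) (length : Int) :
    List Int → PySem.Set Int → List (Int × Int) → Option Int × PySem.Set Int × List (Int × Int)
  | [], vis, q => (none, vis, q)
  | v :: rest, vis, q =>
    if PySem.Int.mod (nget nums v) 2 ≠ pi then (some (length + 1), vis, q)
    else forA nums pi length rest (PySem.Set.add vis v) (q ++ [(v, length + 1)])

-- 'while queue:' — fuel only makes the recursion structural; fuel = len(nums)+1 always suffices
-- (each iteration pops one entry and every node is enqueued at most once).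
def loopA (nums : List Int) (pi : Int) : Nat → PySem.Set Int → List (Int × Int) → Int
  | 0, _, _ => -1
  | _ + 1, _, [] => -1
  | fuel + 1, vis, (curr, length) :: rest =>
    match forA nums pi length (possibA nums vis curr) vis rest with
    | (some r, _, _) => r
    | (none, vis', q') => loopA nums pi fuel vis' q'

def bfsA (nums : List Int) (index : Int) : Int :=
  loopA nums (PySem.Int.mod (nget nums index) 2) (nums.length + 1)
    (PySem.Set.ofList [index]) [(index, 0)]

-- 'final = [-1]*n; for index in range(n): final[index] = bfs(index, nums)' = map over the indices
def solve (nums : List Int) : List Int :=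
  (List.range nums.length).map (fun (i : Nat) => bfsA nums (i : Int))

-- ===== PORT B =====
-- rev[v].append(u) for each in-range jump target v of u
def buildRev (nums : List Int) : List (List Int) :=
  (List.range nums.length).foldl (fun rev u =>
    [(u : Int) - nget nums (u : Int), (u : Int) + nget nums (u : Int)].foldl (fun rev v =>
      if 0 ≤ v ∧ v < (nums.length : Int) then rev.set v.toNat ((rev.getD v.toNat []) ++ [(u : Int)])
      else rev) rev)
    (List.replicate nums.length [])

-- body of 'for u in rev[v]: if not seen[u] and nums[u] % 2 == p: …'
def stepB (nums : List Int) (p : Int) (lvl : Int)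
    (st : List Bool × List Int × List Int) (u : Int) : List Bool × List Int × List Int :=
  if ¬ (st.1.getD u.toNat false) = true ∧ PySem.Int.mod (nget nums u) 2 = p then
    (st.1.set u.toNat true, st.2.1.set u.toNat lvl, st.2.2 ++ [u])
  else st

-- 'while frontier:' with level increment; fuel = len(nums)+1 always suffices
-- (every round with a nonempty frontier permanently marks at least one fresh node seen).
def loopB (nums : List Int) (p : Int) (rev : List (List Int)) :
    Nat → List Int → List Bool → List Int → Int → List Int
  | 0, _, _, ans, _ => ans
  | _ + 1, [], _, ans, _ => ans
  | fuel + 1, v :: fr, seen, ans, level =>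
    let st := ((v :: fr).foldl (fun st v =>
      (rev.getD v.toNat []).foldl (stepB nums p (level + 1)) st) (seen, ans, []))
    loopB nums p rev fuel st.2.2 st.1 st.2.1 (level + 1)

def relaxB (nums : List Int) (p : Int) (rev : List (List Int)) (ans : List Int) : List Int :=
  loopB nums p rev (nums.length + 1)
    ((List.range nums.length).filterMap (fun (v : Nat) =>
      if PySem.Int.mod (nget nums (v : Int)) 2 ≠ p then some (v : Int) else none))
    ((List.range nums.length).map (fun (v : Nat) => decide (PySem.Int.mod (nget nums (v : Int)) 2 ≠ p)))
    ans 0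

def solve_alt (nums : List Int) : List Int :=
  relaxB nums 1 (buildRev nums) (relaxB nums 0 (buildRev nums) (List.replicate nums.length (-1)))

-- ===== PRECONDITION & SPEC =====
def Spec_solve (nums : List Int) (out : List Int) : Prop := out = solve_alt nums
instance (nums : List Int) (out : List Int) : Decidable (Spec_solve nums out) := by unfold Spec_solve; infer_instance

-- ===== CLAIM (what is proved, stated in full; the proofs are below) =====
def Claim_equal_solve : Prop := ∀ (nums : List Int), Dom_solve nums → Spec_solve nums (solve nums)

-- ===== LEMMAS AND PROOFS =====

-- ---------- proof-side notions ----------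
-- in-range vertex
def inR (nums : List Int) (v : Int) : Prop := 0 ≤ v ∧ v < (nums.length : Int)
-- parity of nums[v] (Python % 2)
def par (nums : List Int) (v : Int) : Int := PySem.Int.mod (nget nums v) 2
-- w is one of the two jump targets of u
def jmp (nums : List Int) (u w : Int) : Prop := w = u - nget nums u ∨ w = u + nget nums u

-- Qp nums p k v: there is an escape chain of exact length k from v:
-- k = 0 means v itself is in range with parity ≠ p; k+1 means v is a parity-p
-- in-range node with a jump to a node having an escape chain of length k.
def Qp (nums : List Int) (p : Int) : Nat → Int → Prop
  | 0, v => inR nums v ∧ par nums v ≠ p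
  | k + 1, v => inR nums v ∧ par nums v = p ∧
      ((inR nums (v - nget nums v) ∧ Qp nums p k (v - nget nums v)) ∨
       (inR nums (v + nget nums v) ∧ Qp nums p k (v + nget nums v)))

-- minimal escape level
def QEq (nums : List Int) (p : Int) (k : Nat) (v : Int) : Prop :=
  Qp nums p k v ∧ ∀ j < k, ¬ Qp nums p j v

-- Reach nums p i j v: forward chain i → v of exact length j whose nodes past i
-- are in-range parity-p nodes
def Reach (nums : List Int) (p i : Int) : Nat → Int → Prop
  | 0, v => v = i
  | j + 1, v => inR nums v ∧ par nums v = p ∧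
      ∃ u, Reach nums p i j u ∧ inR nums u ∧ jmp nums u v

-- minimal forward distance
def dEq (nums : List Int) (p i : Int) (j : Nat) (v : Int) : Prop :=
  Reach nums p i j v ∧ ∀ j' < j, ¬ Reach nums p i j' v

-- the BFS loop invariant of A (queue split into current level A at ℓ and next level B)
structure InvAB (nums : List Int) (p i : Int) (ℓ : Nat) (vis : List Int)
    (A B : List (Int × Int)) : Prop where
  hA : ∀ e ∈ A, e.2 = (ℓ : Int) ∧ dEq nums p i ℓ e.1
  hB : ∀ e ∈ B, e.2 = (ℓ : Int) + 1 ∧ dEq nums p i (ℓ + 1) e.1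
  hnodup : ((A ++ B).map Prod.fst).Nodup
  hvis : ∀ v, v ∈ vis ↔ (∃ j ≤ ℓ, Reach nums p i j v) ∨ v ∈ B.map Prod.fst
  hvisnd : vis.Nodup
  hfree : ∀ j < ℓ, ∀ v, Reach nums p i j v → ¬ Qp nums p 1 v
  hfreeA : ∀ v, dEq nums p i ℓ v → v ∉ A.map Prod.fst → ¬ Qp nums p 1 v
  hfront : ∀ w, dEq nums p i (ℓ + 1) w → w ∈ B.map Prod.fst ∨
      ∃ v ∈ A.map Prod.fst, inR nums v ∧ jmp nums v w

-- ---------- generalities ----------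
theorem nat_exists_min {P : Nat → Prop} (h : ∃ k, P k) : ∃ k, P k ∧ ∀ j < k, ¬ P j := by
  obtain ⟨k, hk⟩ := h
  induction k using Nat.strong_induction_on with
  | _ k IH =>
    by_cases h' : ∃ j < k, P j
    · obtain ⟨j, hj, hPj⟩ := h'
      exact IH j hj hPj
    · exact ⟨k, hk, fun j hj hPj => h' ⟨j, hj, hPj⟩⟩

-- ---------- basic facts ----------
theorem reach_inR {nums : List Int} {p i : Int} (hi : inR nums i) :
    ∀ {j v}, Reach nums p i j v → inR nums v := by
  intro j v h
  cases j with
  | zero => simp only [Reach] at h; exact h ▸ hi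
  | succ j => exact h.1

theorem reach_par {nums : List Int} {p i : Int} {j : Nat} {v : Int}
    (h : Reach nums p i (j + 1) v) : par nums v = p := by
  exact h.2.1

theorem qp_inR {nums : List Int} {p : Int} : ∀ {k v}, Qp nums p k v → inR nums v := by
  intro k v h
  cases k with
  | zero => exact h.1
  | succ k => exact h.1

theorem qp_par {nums : List Int} {p : Int} {k : Nat} {v : Int}
    (h : Qp nums p (k + 1) v) : par nums v = p := by
  exact h.2.1

theorem reach_min {nums : List Int} {p i : Int} {j : Nat} {v : Int}
    (h : Reach nums p i j v) : ∃ j' ≤ j, dEq nums p i j' v := by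
  obtain ⟨k, hk, hmin⟩ := nat_exists_min (P := fun j => Reach nums p i j v) ⟨j, h⟩
  by_cases hle : k ≤ j
  · exact ⟨k, hle, hk, hmin⟩
  · exact absurd h (hmin j (by omega))

theorem qp_min {nums : List Int} {p : Int} {k : Nat} {v : Int}
    (h : Qp nums p k v) : ∃ k' ≤ k, QEq nums p k' v := by
  obtain ⟨k', hk', hmin⟩ := nat_exists_min (P := fun k => Qp nums p k v) ⟨k, h⟩
  by_cases hle : k' ≤ k
  · exact ⟨k', hle, hk', hmin⟩
  · exact absurd h (hmin k (by omega))

-- a node at minimal forward distance m+1 has a predecessor at minimal distance m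
theorem reach_pred_min {nums : List Int} {p i : Int} {m : Nat} {w : Int}
    (h : dEq nums p i (m + 1) w) :
    ∃ u, dEq nums p i m u ∧ inR nums u ∧ jmp nums u w := by
  obtain ⟨hr, hmin⟩ := h
  obtain ⟨hiw, hpw, u, hru, hiu, hj⟩ := hr
  obtain ⟨j', hj', hdu⟩ := reach_min hru
  refine ⟨u, ?_, hiu, hj⟩
  rcases Nat.lt_or_ge j' m with hlt | hge
  · exact absurd (show Reach nums p i (j' + 1) w from ⟨hiw, hpw, u, hdu.1, hiu, hj⟩)
      (hmin (j' + 1) (by omega))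
  · have hje : j' = m := by omega
    exact hje ▸ hdu

-- a node at minimal escape level m+1 has a jump target at minimal escape level m
theorem qp_pred_min {nums : List Int} {p : Int} {m : Nat} {w : Int}
    (h : QEq nums p (m + 1) w) :
    ∃ u, jmp nums w u ∧ inR nums u ∧ QEq nums p m u := by
  obtain ⟨hq, hmin⟩ := h
  obtain ⟨hiw, hpw, hbr⟩ := hq
  rcases hbr with ⟨hiu, hqu⟩ | ⟨hiu, hqu⟩
  all_goals {
    first
    | refine ⟨w - nget nums w, Or.inl rfl, hiu, ?_⟩
    | refine ⟨w + nget nums w, Or.inr rfl, hiu, ?_⟩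
    obtain ⟨k', hk', hqe⟩ := qp_min hqu
    rcases Nat.lt_or_ge k' m with hlt | hge
    · exact absurd (show Qp nums p (k' + 1) w from ⟨hiw, hpw, by first | exact Or.inl ⟨hiu, hqe.1⟩ | exact Or.inr ⟨hiu, hqe.1⟩⟩)
        (hmin (k' + 1) (by omega))
    · have hke : k' = m := by omega
      exact hke ▸ hqe }

-- forward levels are consecutive: an empty level ends them all
theorem dEq_levels_consecutive {nums : List Int} {p i : Int} {ℓ : Nat}
    (h : ∀ v, ¬ dEq nums p i (ℓ + 1) v) :
    ∀ k v, ¬ dEq nums p i (ℓ + 1 + k) v := by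
  intro k
  induction k with
  | zero => exact h
  | succ k IH =>
    intro v hv
    have hv' : dEq nums p i ((ℓ + 1 + k) + 1) v := by
      have harith : ℓ + 1 + (k + 1) = (ℓ + 1 + k) + 1 := by omega
      exact harith ▸ hv
    obtain ⟨u, hdu, _, _⟩ := reach_pred_min hv'
    exact IH u hdu

theorem qEq_levels_die {nums : List Int} {p : Int} {k0 : Nat}
    (h : ∀ v, ¬ QEq nums p k0 v) :
    ∀ d v, ¬ QEq nums p (k0 + d) v := by
  intro d
  induction d with
  | zero => exact h
  | succ d IH =>
    intro v hv
    have hv' : QEq nums p ((k0 + d) + 1) v := by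
      have : k0 + (d + 1) = (k0 + d) + 1 := by omega
      exact this ▸ hv
    obtain ⟨u, _, _, hqu⟩ := qp_pred_min hv'
    exact IH u hqu

-- ---------- bridges between forward reach and escape chains ----------
theorem bridge_compose {nums : List Int} {p i : Int} (hi : inR nums i) (hpi : par nums i = p) :
    ∀ {j v m}, Reach nums p i j v → Qp nums p m v → Qp nums p (m + j) i := by
  intro j
  induction j with
  | zero =>
    intro v m hr hq
    simp only [Reach] at hr
    exact hr ▸ hq
  | succ j IH =>
    intro v m hr hq
    obtain ⟨hiv, hpv, u, hru, hiu, hj⟩ := hr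
    have hpu : par nums u = p := by
      cases j with
      | zero => simp only [Reach] at hru; exact hru ▸ hpi
      | succ j => exact reach_par hru
    have hqu : Qp nums p (m + 1) u := by
      refine ⟨hiu, hpu, ?_⟩
      rcases hj with hj | hj
      · exact Or.inl ⟨hj ▸ hiv, hj ▸ hq⟩
      · exact Or.inr ⟨hj ▸ hiv, hj ▸ hq⟩
    have := IH hru hqu
    have harith : m + 1 + j = m + (j + 1) := by omega
    exact harith ▸ this

theorem bridge_decompose {nums : List Int} {p i : Int} :
    ∀ {m j u}, Reach nums p i j u → inR nums u → Qp nums p (m + 1) u →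
      ∃ j' v, j' ≤ j + m ∧ Reach nums p i j' v ∧ Qp nums p 1 v := by
  intro m
  induction m with
  | zero =>
    intro j u hr _ hq
    exact ⟨j, u, by omega, hr, hq⟩
  | succ m IH =>
    intro j u hr hiu hq
    obtain ⟨_, hpu, hbr⟩ := hq
    rcases hbr with ⟨hiw, hqw⟩ | ⟨hiw, hqw⟩
    all_goals {
      have hpw : par nums _ = p := qp_par hqw
      have hrw : Reach nums p i (j + 1) _ := ⟨hiw, hpw, u, hr, hiu, by first | exact Or.inl rfl | exact Or.inr rfl⟩
      obtain ⟨j', v, hle, hrv, hqv⟩ := IH hrw hiw hqw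
      exact ⟨j', v, by omega, hrv, hqv⟩ }

-- ---------- forA / possibA characterizations ----------
theorem mem_possibA {nums : List Int} {vis : PySem.Set Int} {curr w : Int} :
    w ∈ possibA nums vis curr ↔ jmp nums curr w ∧ inR nums w ∧ w ∉ vis := by
  unfold possibA
  simp only [List.mem_append]
  constructor
  · intro h
    rcases h with h | h <;> (split_ifs at h with hc <;> simp at h)
    · exact ⟨Or.inl h, h ▸ ⟨hc.1, hc.2.1⟩, h ▸ hc.2.2⟩
    · exact ⟨Or.inr h, h ▸ ⟨hc.1, hc.2.1⟩, h ▸ hc.2.2⟩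
  · rintro ⟨hj | hj, hiw, hnw⟩
    · exact Or.inl (by rw [hj]; rw [if_pos ⟨(hj ▸ hiw).1, (hj ▸ hiw).2, hj ▸ hnw⟩]; simp)
    · exact Or.inr (by rw [hj]; rw [if_pos ⟨(hj ▸ hiw).1, (hj ▸ hiw).2, hj ▸ hnw⟩]; simp)

theorem possibA_nodup {nums : List Int} {vis : PySem.Set Int} {curr : Int}
    (h : curr ∈ vis) : (possibA nums vis curr).Nodup := by
  unfold possibA
  split_ifs with h1 h2 h2 <;> simp
  intro heq
  have hz : nget nums curr = 0 := by omega
  rw [hz] at h1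
  simp at h1
  exact h1.2.2 h

theorem forA_none_eq {nums : List Int} {p L : Int} :
    ∀ {lst : List Int} {vis : PySem.Set Int} {q : List (Int × Int)},
      (∀ v ∈ lst, par nums v = p) → lst.Nodup → (∀ v ∈ lst, v ∉ vis) →
      forA nums p L lst vis q = (none, vis ++ lst, q ++ lst.map (fun v => (v, L + 1))) := by
  intro lst
  induction lst with
  | nil => intro vis q _ _ _; simp [forA]
  | cons v rest IH =>
    intro vis q hpar hnd hnm
    unfold forA
    rw [if_neg (by simpa [par] using hpar v (by simp))]
    rw [PySem.Set.add_of_not_mem (hnm v (by simp))]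
    rw [IH (fun x hx => hpar x (by simp [hx])) hnd.of_cons
      (fun x hx => by
        simp only [List.mem_append, List.mem_singleton]
        rintro (hv | hv)
        · exact hnm x (by simp [hx]) hv
        · exact (List.nodup_cons.mp hnd).1 (hv ▸ hx))]
    simp

theorem forA_some_fst {nums : List Int} {p L : Int} :
    ∀ {lst : List Int} {vis : PySem.Set Int} {q : List (Int × Int)},
      (∃ v ∈ lst, par nums v ≠ p) →
      (forA nums p L lst vis q).1 = some (L + 1) := by
  intro lst
  induction lst with
  | nil => rintro vis q ⟨v, hv, _⟩; simp at hv
  | cons v rest IH =>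
    rintro vis q ⟨w, hw, hpw⟩
    unfold forA
    by_cases hv : PySem.Int.mod (nget nums v) 2 ≠ p
    · rw [if_pos hv]
    · rw [if_neg hv]
      apply IH
      refine ⟨w, ?_, hpw⟩
      rcases List.mem_cons.mp hw with hw | hw
      · exact absurd (show par nums w = p by simpa [par, hw] using not_not.mp hv) hpw
      · exact hw

theorem forA_none_eq' {nums : List Int} {p L : Int} :
    ∀ {lst : List Int} {vis : PySem.Set Int} {q : List (Int × Int)},
      (∀ v ∈ lst, par nums v = p) →
      forA nums p L lst vis q =
        (none, lst.foldl PySem.Set.add vis, q ++ lst.map (fun v => (v, L + 1))) := by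
  intro lst
  induction lst with
  | nil => intro vis q _; simp [forA]
  | cons v rest IH =>
    intro vis q hpar
    unfold forA
    rw [if_neg (by simpa [par] using hpar v (by simp))]
    rw [IH (fun x hx => hpar x (by simp [hx]))]
    simp

-- a Nodup list of in-range indices has length at most nums.length
theorem length_le_of_nodup_inR {nums : List Int} {l : List Int}
    (hnd : l.Nodup) (hin : ∀ x ∈ l, inR nums x) : l.length ≤ nums.length := by
  have hsub : l.toFinset ⊆ Finset.Ico (0 : Int) (nums.length : Int) := by
    intro x hx
    obtain ⟨h1, h2⟩ := hin x (List.mem_toFinset.mp hx)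
    simp [Finset.mem_Ico]
    exact ⟨h1, h2⟩
  have := Finset.card_le_card hsub
  rw [List.toFinset_card_of_nodup hnd] at this
  simpa using this

-- ---------- the two A-side loop theorems ----------
theorem witness_dEq {nums : List Int} {p i : Int} {m : Nat}
    (hw : ∃ v, Reach nums p i m v ∧ Qp nums p 1 v)
    (hmin : ∀ j < m, ∀ v, Reach nums p i j v → ¬ Qp nums p 1 v) :
    ∃ v, dEq nums p i m v ∧ Qp nums p 1 v := by
  obtain ⟨v, hrv, hqv⟩ := hw
  obtain ⟨j', hle, hd⟩ := reach_min hrv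
  rcases Nat.lt_or_ge j' m with hlt | hge
  · exact absurd hqv (hmin j' hlt v hd.1)
  · have : j' = m := by omega
    exact ⟨v, this ▸ hd, hqv⟩

theorem invAB_shift {nums : List Int} {p i : Int} (hi : inR nums i) {ℓ : Nat}
    {vis : List Int} {B : List (Int × Int)}
    (inv : InvAB nums p i ℓ vis [] B) : InvAB nums p i (ℓ + 1) vis B [] := by
  constructor
  · intro e he
    obtain ⟨h1, h2⟩ := inv.hB e he
    exact ⟨by rw [h1]; push_cast; ring, h2⟩
  · intro e he; simp at he
  · simpa using (by simpa using inv.hnodup)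
  · intro v
    rw [inv.hvis v]
    constructor
    · rintro (⟨j, hj, hr⟩ | hv)
      · exact Or.inl ⟨j, by omega, hr⟩
      · obtain ⟨e, he, rfl⟩ := List.mem_map.mp hv
        exact Or.inl ⟨ℓ + 1, le_refl _, (inv.hB e he).2.1⟩
    · rintro (⟨j, hj, hr⟩ | hv)
      · obtain ⟨j', hj', hd⟩ := reach_min hr
        rcases Nat.lt_or_ge j' (ℓ + 1) with hlt | hge
        · exact Or.inl ⟨j', by omega, hd.1⟩
        · have hde : dEq nums p i (ℓ + 1) v := by
            have : j' = ℓ + 1 := by omega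
            exact this ▸ hd
          rcases inv.hfront v hde with hmem | ⟨u, hu, _⟩
          · exact Or.inr hmem
          · simp at hu
      · simp at hv
  · exact inv.hvisnd
  · intro j hj v hr hq
    rcases Nat.lt_or_ge j ℓ with hlt | hge
    · exact inv.hfree j hlt v hr hq
    · have hje : j = ℓ := by omega
      subst hje
      obtain ⟨j', hj', hd⟩ := reach_min hr
      rcases Nat.lt_or_ge j' j with hlt' | hge'
      · exact inv.hfree j' hlt' v hd.1 hq
      · have : j' = j := by omega
        exact inv.hfreeA v (this ▸ hd) (by simp) hq
  · intro v hd hv hq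
    rcases inv.hfront v hd with hmem | ⟨u, hu, _⟩
    · exact hv hmem
    · simp at hu
  · intro w hd
    obtain ⟨u, hdu, hiu, hju⟩ := reach_pred_min hd
    rcases inv.hfront u hdu with hmem | ⟨x, hx, _⟩
    · exact Or.inr ⟨u, hmem, hiu, hju⟩
    · simp at hx

theorem invAB_empty_absurd {nums : List Int} {p i : Int} (hi : inR nums i)
    {m : Nat} (hw : ∃ v, Reach nums p i m v ∧ Qp nums p 1 v)
    (hmin : ∀ j < m, ∀ v, Reach nums p i j v → ¬ Qp nums p 1 v)
    {ℓ : Nat} {vis : List Int}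
    (inv : InvAB nums p i ℓ vis [] []) : False := by
  obtain ⟨v, hdv, hqv⟩ := witness_dEq hw hmin
  rcases lt_trichotomy m ℓ with hlt | heq | hgt
  · exact inv.hfree m hlt v hdv.1 hqv
  · exact inv.hfreeA v (heq ▸ hdv) (by simp) hqv
  · have hnone : ∀ u, ¬ dEq nums p i (ℓ + 1) u := by
      intro u hu
      rcases inv.hfront u hu with h | ⟨_, h, _⟩ <;> simp at h
    have := dEq_levels_consecutive hnone (m - ℓ - 1) v
    have harith : ℓ + 1 + (m - ℓ - 1) = m := by omega
    rw [harith] at this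
    exact this hdv

theorem loopA_pop {nums : List Int} {p i : Int} (hi : inR nums i) (hpi : par nums i = p)
    {m : Nat} (hw : ∃ v, Reach nums p i m v ∧ Qp nums p 1 v)
    (hmin : ∀ j < m, ∀ v, Reach nums p i j v → ¬ Qp nums p 1 v)
    (fuel : Nat)
    (IH : ∀ (ℓ : Nat) (vis : List Int) (A B : List (Int × Int)),
      InvAB nums p i ℓ vis A B →
      (A ++ B).length + (nums.length - vis.length) ≤ fuel →
      loopA nums p fuel vis (A ++ B) = (m : Int) + 1)
    (ℓ : Nat) (vis : List Int) (curr L : Int) (A' B : List (Int × Int))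
    (inv : InvAB nums p i ℓ vis ((curr, L) :: A') B)
    (hfuel : (((curr, L) :: A') ++ B).length + (nums.length - vis.length) ≤ fuel + 1) :
    loopA nums p (fuel + 1) vis (((curr, L) :: A') ++ B) = (m : Int) + 1 := by
  obtain ⟨hL, hdc⟩ := inv.hA (curr, L) (by simp)
  simp only at hL hdc
  have hinc : inR nums curr := reach_inR hi hdc.1
  have hpc : par nums curr = p := by
    cases ℓ with
    | zero => have := hdc.1; simp only [Reach] at this; exact this ▸ hpi
    | succ ℓ' => exact reach_par hdc.1
  have hcv : curr ∈ vis := (inv.hvis curr).mpr (Or.inl ⟨ℓ, le_refl _, hdc.1⟩)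
  have hvispar : ∀ w ∈ vis, par nums w = p := by
    intro w hwv
    rcases (inv.hvis w).mp hwv with ⟨j, hj, hr⟩ | hmem
    · cases j with
      | zero => simp only [Reach] at hr; exact hr ▸ hpi
      | succ j' => exact reach_par hr
    · obtain ⟨e, he, rfl⟩ := List.mem_map.mp hmem
      exact reach_par (inv.hB e he).2.1
  have hlem : ℓ ≤ m := by
    by_contra hgt
    obtain ⟨v, hdv, hqv⟩ := witness_dEq hw hmin
    exact inv.hfree m (by omega) v hdv.1 hqv
  by_cases hx : ∃ w ∈ possibA nums vis curr, par nums w ≠ p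
  · -- an opposite-parity candidate: A returns length + 1 here
    have hexit : Qp nums p 1 curr := by
      obtain ⟨w, hwmem, hwpar⟩ := hx
      obtain ⟨hjw, hiw, _⟩ := mem_possibA.mp hwmem
      refine ⟨hinc, hpc, ?_⟩
      rcases hjw with hjw | hjw
      · exact Or.inl ⟨hjw ▸ hiw, hjw ▸ hiw, hjw ▸ hwpar⟩
      · exact Or.inr ⟨hjw ▸ hiw, hjw ▸ hiw, hjw ▸ hwpar⟩
    have hlm : ℓ = m := by
      by_contra hne
      exact hmin ℓ (by omega) curr hdc.1 hexit
    rcases hfa : forA nums p L (possibA nums vis curr) vis (A' ++ B) with ⟨o, vis', q'⟩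
    have ho : o = some (L + 1) := by
      have := forA_some_fst (vis := vis) (q := A' ++ B) (L := L) hx
      rw [hfa] at this
      exact this
    subst ho
    show loopA nums p (fuel + 1) vis ((curr, L) :: (A' ++ B)) = (m : Int) + 1
    unfold loopA
    rw [hfa]
    show L + 1 = (m : Int) + 1
    rw [hL, hlm]
  · -- no opposite-parity candidate: process the fresh nodes and recurse
    have hall : ∀ w ∈ possibA nums vis curr, par nums w = p := by
      intro w hwv
      by_contra hne
      exact hx ⟨w, hwv, hne⟩
    have hnec : ¬ Qp nums p 1 curr := by
      rintro ⟨_, _, hbr⟩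
      rcases hbr with ⟨hiw, hq0⟩ | ⟨hiw, hq0⟩
      · by_cases hwv : curr - nget nums curr ∈ vis
        · exact hq0.2 (hvispar _ hwv)
        · exact hq0.2 (hall _ (mem_possibA.mpr ⟨Or.inl rfl, hq0.1, hwv⟩))
      · by_cases hwv : curr + nget nums curr ∈ vis
        · exact hq0.2 (hvispar _ hwv)
        · exact hq0.2 (hall _ (mem_possibA.mpr ⟨Or.inr rfl, hq0.1, hwv⟩))
    set P := possibA nums vis curr with hP
    have hPnd : P.Nodup := possibA_nodup hcv
    have hPnv : ∀ w ∈ P, w ∉ vis := fun w hwv => (mem_possibA.mp hwv).2.2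
    have hPin : ∀ w ∈ P, inR nums w := fun w hwv => (mem_possibA.mp hwv).2.1
    have hPj : ∀ w ∈ P, jmp nums curr w := fun w hwv => (mem_possibA.mp hwv).1
    have hPd : ∀ w ∈ P, dEq nums p i (ℓ + 1) w := by
      intro w hwv
      refine ⟨⟨hPin w hwv, hall w hwv, curr, hdc.1, hinc, hPj w hwv⟩, ?_⟩
      intro j hj hr
      exact hPnv w hwv ((inv.hvis w).mpr (Or.inl ⟨j, by omega, hr⟩))
    have hQsub : ∀ v ∈ (A' ++ B).map Prod.fst, v ∈ vis := by
      intro v hv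
      obtain ⟨e, he, rfl⟩ := List.mem_map.mp hv
      rcases List.mem_append.mp he with he' | he'
      · exact (inv.hvis e.1).mpr (Or.inl ⟨ℓ, le_refl _, (inv.hA e (by simp [he'])).2.1⟩)
      · exact (inv.hvis e.1).mpr (Or.inr (List.mem_map.mpr ⟨e, he', rfl⟩))
    have hvin : ∀ x ∈ vis, inR nums x := by
      intro x hxv
      rcases (inv.hvis x).mp hxv with ⟨j, _, hr⟩ | hmem
      · exact reach_inR hi hr
      · obtain ⟨e, he, rfl⟩ := List.mem_map.mp hmem
        exact reach_inR hi (inv.hB e he).2.1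
    show loopA nums p (fuel + 1) vis ((curr, L) :: (A' ++ B)) = (m : Int) + 1
    unfold loopA
    rw [forA_none_eq hall hPnd hPnv]
    show loopA nums p fuel (vis ++ P) ((A' ++ B) ++ P.map (fun v => (v, L + 1))) = (m : Int) + 1
    rw [List.append_assoc]
    set pm := P.map (fun v => (v, L + 1)) with hpm
    have hpmfst : pm.map Prod.fst = P := by simp [hpm, List.map_map, Function.comp_def]
    have htail : ((A' ++ B).map Prod.fst).Nodup :=
      (List.nodup_cons.mp (by simpa using inv.hnodup)).2
    have hvisnd' : (vis ++ P).Nodup :=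
      List.Nodup.append inv.hvisnd hPnd (fun a ha hPa => hPnv a hPa ha)
    refine IH ℓ (vis ++ P) A' (B ++ pm) ⟨?_, ?_, ?_, ?_, hvisnd', inv.hfree, ?_, ?_⟩ ?_
    · exact fun e he => inv.hA e (by simp [he])
    · intro e he
      rcases List.mem_append.mp he with he' | he'
      · exact inv.hB e he'
      · obtain ⟨w, hwP, rfl⟩ := List.mem_map.mp he'
        exact ⟨by simp [hL], hPd w hwP⟩
    · have hdisj : ((A' ++ B).map Prod.fst).Disjoint P := by
        intro a ha haP
        exact hPnv a haP (hQsub a ha)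
      have := List.Nodup.append htail hPnd hdisj
      simpa [List.map_append, hpmfst, List.append_assoc] using this
    · intro v
      have hiv := inv.hvis v
      simp only [List.mem_append, List.map_append, hpmfst]
      rw [hiv]
      exact or_assoc
    · intro v hd hnv
      by_cases hvc : v = curr
      · exact hvc ▸ hnec
      · refine inv.hfreeA v hd ?_
        simp only [List.map_cons, List.mem_cons, not_or]
        exact ⟨hvc, hnv⟩
    · intro w hd
      rcases inv.hfront w hd with hmem | ⟨v, hv, hiv, hjv⟩
      · exact Or.inl (by simp only [List.map_append, hpmfst, List.mem_append]; exact Or.inl hmem)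
      · rw [List.map_cons, List.mem_cons] at hv
        rcases hv with hvc | hvA
        · simp only at hvc
          subst hvc
          by_cases hwv : w ∈ vis
          · rcases (inv.hvis w).mp hwv with ⟨j, hj, hr⟩ | hmem2
            · exact absurd hr (hd.2 j (by omega))
            · exact Or.inl (by simp only [List.map_append, hpmfst, List.mem_append]; exact Or.inl hmem2)
          · refine Or.inl ?_
            have hwP : w ∈ P := mem_possibA.mpr ⟨hjv, reach_inR hi hd.1, hwv⟩
            simp only [List.map_append, hpmfst, List.mem_append]
            exact Or.inr hwP
        · exact Or.inr ⟨v, hvA, hiv, hjv⟩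
    · have hvisin : ∀ x ∈ vis ++ P, inR nums x := by
        intro x hxv
        rcases List.mem_append.mp hxv with h | h
        · exact hvin x h
        · exact hPin x h
      have hlen : (vis ++ P).length ≤ nums.length := length_le_of_nodup_inR hvisnd' hvisin
      have hpmlen : pm.length = P.length := by simp [hpm]
      simp only [List.length_append, List.length_cons] at hfuel hlen ⊢
      omega

theorem loopA_finds {nums : List Int} {p i : Int} (hi : inR nums i) (hpi : par nums i = p)
    {m : Nat} (hw : ∃ v, Reach nums p i m v ∧ Qp nums p 1 v)
    (hmin : ∀ j < m, ∀ v, Reach nums p i j v → ¬ Qp nums p 1 v) :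
    ∀ fuel (ℓ : Nat) (vis : List Int) (A B : List (Int × Int)),
      InvAB nums p i ℓ vis A B →
      (A ++ B).length + (nums.length - vis.length) ≤ fuel →
      loopA nums p fuel vis (A ++ B) = (m : Int) + 1 := by
  intro fuel
  induction fuel with
  | zero =>
    intro ℓ vis A B inv hb
    have hlen : (A ++ B).length = 0 := by omega
    simp only [List.length_append, Nat.add_eq_zero] at hlen
    obtain ⟨hA, hB⟩ := hlen
    rw [List.length_eq_zero_iff] at hA hB
    subst hA; subst hB
    exact (invAB_empty_absurd hi hw hmin inv).elim
  | succ fuel IH =>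
    intro ℓ vis A B inv hb
    cases A with
    | cons e A' =>
      obtain ⟨curr, L⟩ := e
      exact loopA_pop hi hpi hw hmin fuel IH ℓ vis curr L A' B inv hb
    | nil =>
      cases B with
      | nil => exact (invAB_empty_absurd hi hw hmin inv).elim
      | cons e B' =>
        obtain ⟨curr, L⟩ := e
        have inv' := invAB_shift hi inv
        have hgoal := loopA_pop hi hpi hw hmin fuel IH (ℓ + 1) vis curr L B' [] inv'
          (by simpa using hb)
        simpa using hgoal

theorem loopA_noesc {nums : List Int} {p i : Int} (hi : inR nums i) (hpi : par nums i = p)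
    (h : ∀ j v, Reach nums p i j v → ¬ Qp nums p 1 v) :
    ∀ fuel (vis : List Int) (Q : List (Int × Int)),
      (∀ e ∈ Q, ∃ j, Reach nums p i j e.1) →
      loopA nums p fuel vis Q = -1 := by
  intro fuel
  induction fuel with
  | zero => intro vis Q _; rfl
  | succ fuel IH =>
    intro vis Q hQ
    match Q with
    | [] => rfl
    | (curr, L) :: rest =>
      obtain ⟨j, hrj⟩ := hQ (curr, L) (by simp)
      have hinc : inR nums curr := reach_inR hi hrj
      have hpc : par nums curr = p := by
        cases j with
        | zero => simp only [Reach] at hrj; exact hrj ▸ hpi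
        | succ j => exact reach_par hrj
      have hall : ∀ w ∈ possibA nums vis curr, par nums w = p := by
        intro w hw
        by_contra hne
        obtain ⟨hjw, hiw, _⟩ := mem_possibA.mp hw
        refine h j curr hrj ⟨hinc, hpc, ?_⟩
        rcases hjw with hjw | hjw
        · exact Or.inl ⟨hjw ▸ hiw, hjw ▸ hiw, hjw ▸ hne⟩
        · exact Or.inr ⟨hjw ▸ hiw, hjw ▸ hiw, hjw ▸ hne⟩
      show loopA nums p (fuel + 1) vis ((curr, L) :: rest) = -1
      unfold loopA
      rw [forA_none_eq' hall]
      apply IH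
      intro e he
      rcases List.mem_append.mp he with he | he
      · exact hQ e (by simp [he])
      · obtain ⟨w, hw, hew⟩ := List.mem_map.mp he
        obtain ⟨hjw, hiw, _⟩ := mem_possibA.mp hw
        exact ⟨j + 1, by
          rw [← hew]
          exact ⟨hiw, hall w hw, curr, hrj, hinc, hjw⟩⟩

-- ---------- bfsA characterization ----------
theorem bfsA_eq_of_QEq {nums : List Int} {i : Int} (hi : inR nums i) {k : Nat}
    (h : QEq nums (par nums i) k i) : bfsA nums i = (k : Int) := by
  set p := par nums i with hp
  have hr0 : Reach nums p i 0 i := rfl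
  cases k with
  | zero => exact absurd hp.symm h.1.2
  | succ k' =>
    obtain ⟨j0, v0, hle0, hrv0, hqv0⟩ := bridge_decompose hr0 hi h.1
    obtain ⟨m, hm, hminm⟩ :=
      nat_exists_min (P := fun j => ∃ v, Reach nums p i j v ∧ Qp nums p 1 v) ⟨j0, v0, hrv0, hqv0⟩
    have hmin' : ∀ j < m, ∀ v, Reach nums p i j v → ¬ Qp nums p 1 v :=
      fun j hj v hr hq => hminm j hj ⟨v, hr, hq⟩
    have hn1 : 1 ≤ nums.length := by
      obtain ⟨h1, h2⟩ := hi
      omega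
    have inv0 : InvAB nums p i 0 [i] [(i, (0 : Int))] [] := by
      constructor
      · intro e he
        simp at he
        subst he
        exact ⟨by simp, rfl, by omega⟩
      · intro e he; simp at he
      · simp
      · intro v
        simp only [List.mem_singleton, List.map_nil, List.mem_nil_iff, or_false]
        constructor
        · rintro rfl; exact ⟨0, le_refl _, rfl⟩
        · rintro ⟨j, hj, hr⟩
          have : j = 0 := by omega
          subst this
          exact hr
      · simp
      · intro j hj; omega
      · intro v hd hnv hq
        exact hnv (by simpa using hd.1)
      · intro w hd
        obtain ⟨_, _, u, hru, hiu, hju⟩ := hd.1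
        simp only [Reach] at hru
        subst hru
        exact Or.inr ⟨u, by simp, hiu, hju⟩
    have hres := loopA_finds hi hp.symm hm hmin' (nums.length + 1) 0 [i] [(i, (0 : Int))] [] inv0
      (by simp; omega)
    have hkm : k' + 1 = m + 1 := by
      have hge : k' + 1 ≤ m + 1 := by
        obtain ⟨v1, hrv1, hqv1⟩ := hm
        have := bridge_compose hi hp.symm hrv1 hqv1
        by_contra hlt
        exact h.2 (1 + m) (by omega) this
      have hle : m + 1 ≤ k' + 1 := by
        obtain ⟨j', v', hle', hrv', hqv'⟩ := bridge_decompose hr0 hi h.1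
        by_contra hlt
        exact hminm j' (by omega) ⟨v', hrv', hqv'⟩
      omega
    show loopA nums p (nums.length + 1) (PySem.Set.ofList [i]) [(i, 0)] = ((k' + 1 : Nat) : Int)
    have hof : PySem.Set.ofList [i] = [i] := rfl
    rw [hof]
    have : loopA nums p (nums.length + 1) [i] [(i, (0 : Int))] = (m : Int) + 1 := by
      simpa using hres
    rw [this, hkm]
    push_cast
    ring

theorem bfsA_eq_neg_one {nums : List Int} {i : Int} (hi : inR nums i)
    (h : ∀ k, ¬ Qp nums (par nums i) k i) : bfsA nums i = -1 := by
  set p := par nums i with hp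
  have hnoesc : ∀ j v, Reach nums p i j v → ¬ Qp nums p 1 v := by
    intro j v hr hq
    exact h (1 + j) (bridge_compose hi hp.symm hr hq)
  show loopA nums p (nums.length + 1) (PySem.Set.ofList [i]) [(i, 0)] = -1
  exact loopA_noesc hi hp.symm hnoesc (nums.length + 1) (PySem.Set.ofList [i]) [(i, 0)]
    (by intro e he; simp at he; subst he; exact ⟨0, rfl⟩)

-- ---------- B-side: buildRev characterization ----------
-- contribution of source index u to the reverse-adjacency list of target w
def contribB (nums : List Int) (u : Int) (w : Nat) : List Int :=
  (if u - nget nums u = (w : Int) then [u] else []) ++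
  (if u + nget nums u = (w : Int) then [u] else [])

theorem setApp_getD {nums : List Int} {r : List (List Int)} {v x : Int} {w : Nat}
    (hw : w < r.length) (hn : r.length = nums.length) :
    ((if 0 ≤ v ∧ v < (nums.length : Int) then
        r.set v.toNat ((r.getD v.toNat []) ++ [x]) else r).getD w []) =
      r.getD w [] ++ (if v = (w : Int) then [x] else []) := by
  split_ifs with h1 h2 h2
  · have hvw : v.toNat = w := by omega
    subst hvw
    simp [List.getD_eq_getElem?_getD, List.getElem?_set, hw]
  · have hvw : v.toNat ≠ w := by omega
    simp [List.getD_eq_getElem?_getD, List.getElem?_set, hvw]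
  · exfalso; omega
  · simp

theorem buildRev_fold_aux {nums : List Int} :
    ∀ (us : List Int) (rev : List (List Int)), rev.length = nums.length →
      ((us.foldl (fun rev u =>
        [u - nget nums u, u + nget nums u].foldl (fun rev v =>
          if 0 ≤ v ∧ v < (nums.length : Int) then
            rev.set v.toNat ((rev.getD v.toNat []) ++ [u])
          else rev) rev) rev).length = nums.length) ∧
      (∀ w : Nat, w < nums.length →
        (us.foldl (fun rev u =>
          [u - nget nums u, u + nget nums u].foldl (fun rev v =>
            if 0 ≤ v ∧ v < (nums.length : Int) then
              rev.set v.toNat ((rev.getD v.toNat []) ++ [u])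
            else rev) rev) rev).getD w [] =
          rev.getD w [] ++ us.flatMap (fun u => contribB nums u w)) := by
  intro us
  induction us with
  | nil => intro rev h; exact ⟨h, by simp⟩
  | cons u us IH =>
    intro rev hlen
    have hs1len : (if 0 ≤ u - nget nums u ∧ u - nget nums u < (nums.length : Int) then
        rev.set (u - nget nums u).toNat ((rev.getD (u - nget nums u).toNat []) ++ [u])
      else rev).length = nums.length := by split_ifs <;> simp [hlen]
    have hs2len : ([u - nget nums u, u + nget nums u].foldl (fun rev v =>
        if 0 ≤ v ∧ v < (nums.length : Int) then
          rev.set v.toNat ((rev.getD v.toNat []) ++ [u])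
        else rev) rev).length = nums.length := by
      simp only [List.foldl_cons, List.foldl_nil]
      split_ifs <;> first | simpa using hs1len | (simp; simp at hs1len; omega) | simp [hlen]
    obtain ⟨hl, hg⟩ := IH _ hs2len
    refine ⟨by rw [List.foldl_cons]; exact hl, ?_⟩
    intro w hw
    rw [List.foldl_cons, hg w hw]
    simp only [List.foldl_cons, List.foldl_nil]
    rw [setApp_getD (v := u + nget nums u) (x := u) (by omega) hs1len]
    rw [setApp_getD (v := u - nget nums u) (x := u) (by omega) hlen]
    simp [contribB, List.append_assoc]

theorem mem_buildRev {nums : List Int} {w : Nat} (hw : w < nums.length) {u : Int} :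
    u ∈ (buildRev nums).getD w [] ↔ inR nums u ∧ jmp nums u (w : Int) := by
  have hrw : buildRev nums =
      (((List.range nums.length).map (fun (a : Nat) => (a : Int))).foldl (fun rev u =>
        [u - nget nums u, u + nget nums u].foldl (fun rev v =>
          if 0 ≤ v ∧ v < (nums.length : Int) then
            rev.set v.toNat ((rev.getD v.toNat []) ++ [u])
          else rev) rev) (List.replicate nums.length [])) := by
    unfold buildRev
    congr 1
    rw [List.map_eq_flatMap]; rfl
  rw [hrw]
  obtain ⟨_, hg⟩ := buildRev_fold_aux (nums := nums)
    ((List.range nums.length).map (fun (a : Nat) => (a : Int)))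
    (List.replicate nums.length []) (by simp)
  rw [hg w hw]
  have hrep : (List.replicate nums.length ([] : List Int)).getD w [] = [] := by
    simp [List.getD_eq_getElem?_getD, List.getElem?_replicate, hw]
  rw [hrep]
  simp only [List.nil_append, List.mem_flatMap, List.mem_map, List.mem_range]
  constructor
  · rintro ⟨uu, ⟨un, hun, rfl⟩, hmem⟩
    unfold contribB at hmem
    rcases List.mem_append.mp hmem with h | h <;> (split_ifs at h with hc <;> simp at h) <;> subst h
    · exact ⟨⟨by omega, by omega⟩, Or.inl hc.symm⟩
    · exact ⟨⟨by omega, by omega⟩, Or.inr hc.symm⟩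
  · rintro ⟨⟨h0, hlt⟩, hj⟩
    refine ⟨u, ⟨u.toNat, by omega, by omega⟩, ?_⟩
    unfold contribB
    rw [List.mem_append]
    rcases hj with hj | hj
    · exact Or.inl (by rw [if_pos hj.symm]; simp)
    · exact Or.inr (by rw [if_pos hj.symm]; simp)

-- ---------- B-side: one round of marking ----------
theorem stepB_fold {nums : List Int} {p lvl : Int} :
    ∀ (S : List Int) (seen : List Bool) (ans nxt : List Int),
      (∀ u ∈ S, inR nums u) →
      seen.length = nums.length → ans.length = nums.length →
      nxt.Nodup → (∀ x ∈ nxt, seen.getD x.toNat false = true) →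
      (S.foldl (stepB nums p lvl) (seen, ans, nxt)).1.length = nums.length ∧
      (S.foldl (stepB nums p lvl) (seen, ans, nxt)).2.1.length = nums.length ∧
      (∀ j : Nat, j < nums.length →
        ((S.foldl (stepB nums p lvl) (seen, ans, nxt)).1.getD j false = true ↔
          seen.getD j false = true ∨ ((j : Int) ∈ S ∧ par nums (j : Int) = p))) ∧
      (∀ j : Nat, j < nums.length →
        (S.foldl (stepB nums p lvl) (seen, ans, nxt)).2.1.getD j 0 =
          (if seen.getD j false = false ∧ (j : Int) ∈ S ∧ par nums (j : Int) = p then lvl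
           else ans.getD j 0)) ∧
      (∀ x : Int, x ∈ (S.foldl (stepB nums p lvl) (seen, ans, nxt)).2.2 ↔
        x ∈ nxt ∨ (x ∈ S ∧ seen.getD x.toNat false = false ∧ par nums x = p)) ∧
      (S.foldl (stepB nums p lvl) (seen, ans, nxt)).2.2.Nodup ∧
      (∀ x ∈ (S.foldl (stepB nums p lvl) (seen, ans, nxt)).2.2,
        (S.foldl (stepB nums p lvl) (seen, ans, nxt)).1.getD x.toNat false = true) := by
  intro S
  induction S with
  | nil =>
    intro seen ans nxt hS hsl hal hnd hmem
    refine ⟨hsl, hal, ?_, ?_, ?_, hnd, hmem⟩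
    · intro j hj; simp
    · intro j hj; simp
    · intro x; simp
  | cons u S' IH =>
    intro seen ans nxt hS hsl hal hnd hmem
    have hiu : inR nums u := hS u (by simp)
    have hun : u.toNat < nums.length := by obtain ⟨h1, h2⟩ := hiu; omega
    have hcastu : (u.toNat : Int) = u := by obtain ⟨h1, _⟩ := hiu; omega
    simp only [List.foldl_cons]
    by_cases hgu : seen.getD u.toNat false = false ∧ par nums u = p
    · -- u gets marked
      have hstep : stepB nums p lvl (seen, ans, nxt) u =
          (seen.set u.toNat true, ans.set u.toNat lvl, nxt ++ [u]) := by
        unfold stepB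
        rw [if_pos]
        exact ⟨by rw [Bool.not_eq_true]; exact hgu.1, hgu.2⟩
      rw [hstep]
      have hsl1 : (seen.set u.toNat true).length = nums.length := by simpa using hsl
      have hal1 : (ans.set u.toNat lvl).length = nums.length := by simpa using hal
      have hseen1 : ∀ j : Nat, (seen.set u.toNat true).getD j false =
          (if j = u.toNat then true else seen.getD j false) := by
        intro j
        by_cases hju : j = u.toNat
        · subst hju
          simp [List.getD_eq_getElem?_getD, List.getElem?_set, hun, hsl]
        · have hne : u.toNat ≠ j := fun h => hju h.symm
          simp [List.getD_eq_getElem?_getD, List.getElem?_set, hne, hju]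
      have hnu : u ∉ nxt := by
        intro hx
        rw [hmem u hx] at hgu
        simp at hgu
      have hnd1 : (nxt ++ [u]).Nodup := by
        rw [List.nodup_append]
        refine ⟨hnd, by simp, ?_⟩
        intro x hx y hy
        rcases List.mem_singleton.mp hy with rfl
        exact fun heq => hnu (heq ▸ hx)
      have hmem1 : ∀ x ∈ nxt ++ [u], (seen.set u.toNat true).getD x.toNat false = true := by
        intro x hx
        rw [hseen1]
        rcases List.mem_append.mp hx with hx | hx
        · by_cases hxu : x.toNat = u.toNat
          · simp [hxu]
          · simp [hxu]; exact hmem x hx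
        · simp at hx
          subst hx
          simp
      obtain ⟨c1, c2, c3, c4, c5, c6, c7⟩ := IH (seen.set u.toNat true) (ans.set u.toNat lvl)
        (nxt ++ [u]) (fun v hv => hS v (by simp [hv])) hsl1 hal1 hnd1 hmem1
      refine ⟨c1, c2, ?_, ?_, ?_, c6, c7⟩
      · intro j hj
        rw [c3 j hj, hseen1 j]
        by_cases hju : j = u.toNat
        · subst hju
          simp only [if_pos rfl, hcastu]
          constructor
          · intro _; exact Or.inr ⟨by simp, hgu.2⟩
          · intro _; simp
        · rw [if_neg hju]
          have hjne : (j : Int) ≠ u := by omega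
          simp only [List.mem_cons]
          constructor
          · rintro (h | ⟨hm, hp⟩)
            · exact Or.inl h
            · exact Or.inr ⟨Or.inr hm, hp⟩
          · rintro (h | ⟨hm | hm, hp⟩)
            · exact Or.inl h
            · exact absurd hm hjne
            · exact Or.inr ⟨hm, hp⟩
      · intro j hj
        rw [c4 j hj, hseen1 j]
        by_cases hju : j = u.toNat
        · subst hju
          simp only [if_pos rfl]
          have hset : (ans.set u.toNat lvl).getD u.toNat 0 = lvl := by
            simp [List.getD_eq_getElem?_getD, List.getElem?_set, hun, hal]
          rw [if_neg (by simp)]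
          rw [hset, if_pos ⟨hgu.1, by rw [hcastu]; simp, by rw [hcastu]; exact hgu.2⟩]
        · rw [if_neg hju]
          have hjne : (j : Int) ≠ u := by omega
          have hset : (ans.set u.toNat lvl).getD j 0 = ans.getD j 0 := by
            simp [List.getD_eq_getElem?_getD, List.getElem?_set, Ne.symm hju, hju]
          rw [hset]
          by_cases hc : seen.getD j false = false ∧ (j : Int) ∈ S' ∧ par nums (j : Int) = p
          · rw [if_pos hc, if_pos ⟨hc.1, by simp [hc.2.1], hc.2.2⟩]
          · rw [if_neg hc, if_neg (by
              rintro ⟨hb, hm, hp⟩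
              rcases List.mem_cons.mp hm with hm | hm
              · exact hjne hm
              · exact hc ⟨hb, hm, hp⟩)]
      · intro x
        rw [c5 x]
        constructor
        · rintro (hx | ⟨hxS, hxs, hxp⟩)
          · rcases List.mem_append.mp hx with hx | hx
            · exact Or.inl hx
            · simp at hx
              subst hx
              exact Or.inr ⟨by simp, hgu.1, hgu.2⟩
          · rw [hseen1] at hxs
            by_cases hxu : x.toNat = u.toNat
            · simp [hxu] at hxs
            · rw [if_neg hxu] at hxs
              exact Or.inr ⟨by simp [hxS], hxs, hxp⟩
        · rintro (hx | ⟨hxS, hxs, hxp⟩)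
          · exact Or.inl (List.mem_append_left _ hx)
          · rcases List.mem_cons.mp hxS with hx | hx
            · subst hx
              exact Or.inl (List.mem_append_right _ (by simp))
            · by_cases hxu : x.toNat = u.toNat
              · have : x = u := by
                  obtain ⟨hx1, _⟩ := hS x (by simp [hx])
                  omega
                subst this
                exact Or.inl (List.mem_append_right _ (by simp))
              · refine Or.inr ⟨hx, ?_, hxp⟩
                rw [hseen1, if_neg hxu]
                exact hxs
    · -- u is skipped
      have hstep : stepB nums p lvl (seen, ans, nxt) u = (seen, ans, nxt) := by
        unfold stepB
        rw [if_neg]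
        rintro ⟨hb, hp⟩
        exact hgu ⟨by simpa using hb, hp⟩
      rw [hstep]
      obtain ⟨c1, c2, c3, c4, c5, c6, c7⟩ := IH seen ans nxt
        (fun v hv => hS v (by simp [hv])) hsl hal hnd hmem
      have hgu' : seen.getD u.toNat false = true ∨ par nums u ≠ p := by
        by_cases h1 : seen.getD u.toNat false = true
        · exact Or.inl h1
        · refine Or.inr fun hp => hgu ⟨by simpa using h1, hp⟩
      refine ⟨c1, c2, ?_, ?_, ?_, c6, c7⟩
      · intro j hj
        rw [c3 j hj]
        simp only [List.mem_cons]
        constructor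
        · rintro (h | ⟨hm, hp⟩)
          · exact Or.inl h
          · exact Or.inr ⟨Or.inr hm, hp⟩
        · rintro (h | ⟨hm | hm, hp⟩)
          · exact Or.inl h
          · -- j is u: guard failed, so either seen or wrong parity
            have hju : j = u.toNat := by omega
            subst hju
            rcases hgu' with h1 | h1
            · exact Or.inl h1
            · rw [hm] at hp
              exact absurd hp h1
          · exact Or.inr ⟨hm, hp⟩
      · intro j hj
        rw [c4 j hj]
        by_cases hc : seen.getD j false = false ∧ (j : Int) ∈ S' ∧ par nums (j : Int) = p
        · rw [if_pos hc, if_pos ⟨hc.1, by simp [hc.2.1], hc.2.2⟩]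
        · rw [if_neg hc, if_neg (by
            rintro ⟨hb, hm, hp⟩
            rcases List.mem_cons.mp hm with hm | hm
            · have hju : j = u.toNat := by omega
              subst hju
              rw [hm] at hp
              rcases hgu' with h1 | h1
              · rw [hb] at h1; simp at h1
              · exact h1 hp
            · exact hc ⟨hb, hm, hp⟩)]
      · intro x
        rw [c5 x]
        constructor
        · rintro (hx | ⟨hxS, hxs, hxp⟩)
          · exact Or.inl hx
          · exact Or.inr ⟨by simp [hxS], hxs, hxp⟩
        · rintro (hx | ⟨hxS, hxs, hxp⟩)
          · exact Or.inl hx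
          · rcases List.mem_cons.mp hxS with hx | hx
            · subst hx
              rcases hgu' with h1 | h1
              · rw [hxs] at h1; simp at h1
              · exact absurd hxp h1
            · exact Or.inr ⟨hx, hxs, hxp⟩

-- ---------- B-side: the reverse-BFS loop ----------
theorem countP_lt_of_witness {α : Type} {l : List α} {p q : α → Bool}
    (h : ∀ x ∈ l, p x = true → q x = true)
    {x0 : α} (hx0 : x0 ∈ l) (hp : p x0 = false) (hq : q x0 = true) :
    l.countP p < l.countP q := by
  induction l with
  | nil => simp at hx0
  | cons a l IH =>
    rw [List.countP_cons, List.countP_cons]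
    rcases List.mem_cons.mp hx0 with rfl | hx0'
    · rw [hp, hq]
      have : l.countP p ≤ l.countP q :=
        List.countP_mono_left (fun x hx => h x (List.mem_cons_of_mem _ hx))
      simp
      omega
    · have hrec := IH (fun x hx hpx => h x (List.mem_cons_of_mem _ hx) hpx) hx0'
      have hha : (if p a then 1 else 0) ≤ (if q a then 1 else 0) := by
        by_cases hpa : p a = true
        · rw [if_pos hpa, if_pos (h a (by simp) hpa)]
        · simp [hpa]
      omega

theorem loopB_empty {nums : List Int} {p : Int} {rev : List (List Int)} :
    ∀ (fuel : Nat) (seen : List Bool) (ans : List Int) (lvl : Int),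
      loopB nums p rev fuel [] seen ans lvl = ans := by
  intro fuel seen ans lvl
  cases fuel <;> rfl

theorem loopB_spec {nums : List Int} {p : Int} (ans0 : List Int) :
    ∀ (fuel k : Nat) (fr : List Int) (seen : List Bool) (ans : List Int),
      seen.length = nums.length → ans.length = nums.length →
      (∀ j : Nat, j < nums.length →
        (seen.getD j false = true ↔ ∃ m ≤ k, Qp nums p m (j : Int))) →
      (∀ v : Int, v ∈ fr ↔ QEq nums p k v) →
      fr.Nodup →
      (∀ j : Nat, j < nums.length → ∀ m : Nat, 1 ≤ m → m ≤ k → QEq nums p m (j : Int) →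
        ans.getD j 0 = (m : Int)) →
      (∀ j : Nat, j < nums.length → (∀ m : Nat, 1 ≤ m → m ≤ k → ¬ QEq nums p m (j : Int)) →
        ans.getD j 0 = ans0.getD j 0) →
      nums.length + 1 ≤ fuel + (List.range nums.length).countP (fun j => seen.getD j false) →
      (loopB nums p (buildRev nums) fuel fr seen ans (k : Int)).length = nums.length ∧
      (∀ j : Nat, j < nums.length → ∀ m : Nat, 1 ≤ m → QEq nums p m (j : Int) →
        (loopB nums p (buildRev nums) fuel fr seen ans (k : Int)).getD j 0 = (m : Int)) ∧
      (∀ j : Nat, j < nums.length → (∀ m : Nat, 1 ≤ m → ¬ QEq nums p m (j : Int)) →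
        (loopB nums p (buildRev nums) fuel fr seen ans (k : Int)).getD j 0 = ans0.getD j 0) := by
  intro fuel
  induction fuel with
  | zero =>
    intro k fr seen ans hsl hal hseen hfr hfrnd hans1 hans2 hbound
    exfalso
    have := List.countP_le_length (l := List.range nums.length)
      (p := fun j => seen.getD j false)
    simp only [List.length_range] at this
    omega
  | succ fuel IH =>
    intro k fr seen ans hsl hal hseen hfr hfrnd hans1 hans2 hbound
    cases fr with
    | nil =>
      -- frontier empty: level k is empty, so all later levels are empty too
      have hnk : ∀ v, ¬ QEq nums p k v := by
        intro v hv
        have := (hfr v).mpr hv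
        simp at this
      have hnone : ∀ m, k ≤ m → ∀ v, ¬ QEq nums p m v := by
        intro m hm v
        have := qEq_levels_die hnk (m - k) v
        have harith : k + (m - k) = m := by omega
        rw [harith] at this
        exact this
      show (ans.length = nums.length) ∧ _ ∧ _
      refine ⟨hal, ?_, ?_⟩
      · intro j hj m hm1 hQ
        rcases Nat.lt_or_ge m k with hlt | hge
        · exact hans1 j hj m hm1 (by omega) hQ
        · exact absurd hQ (hnone m hge _)
      · intro j hj hno
        exact hans2 j hj (fun m hm1 _ => hno m hm1)
    | cons v fr' =>
      have hcollapse : (v :: fr').foldl (fun st v =>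
          ((buildRev nums).getD v.toNat []).foldl (stepB nums p ((k : Int) + 1)) st)
          (seen, ans, []) =
          ((v :: fr').flatMap (fun v => (buildRev nums).getD v.toNat [])).foldl
            (stepB nums p ((k : Int) + 1)) (seen, ans, []) :=
        (List.foldl_flatMap).symm
      set S := (v :: fr').flatMap (fun v => (buildRev nums).getD v.toNat []) with hSdef
      have hfrin : ∀ w ∈ v :: fr', inR nums w := by
        intro w hw
        exact qp_inR ((hfr w).mp hw).1
      have hS : ∀ u ∈ S, inR nums u := by
        intro u hu
        rw [hSdef, List.mem_flatMap] at hu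
        obtain ⟨w, hwfr, hu⟩ := hu
        have hiw := hfrin w hwfr
        have hwn : w.toNat < nums.length := by obtain ⟨h1, h2⟩ := hiw; omega
        exact (mem_buildRev hwn |>.mp hu).1
      obtain ⟨c1, c2, c3, c4, c5, c6, c7⟩ :=
        stepB_fold (nums := nums) (p := p) (lvl := (k : Int) + 1) S seen ans []
          hS hsl hal (by simp) (by simp)
      -- the marked set of this round is exactly level k+1
      have hchar : ∀ x : Int,
          (x ∈ S ∧ seen.getD x.toNat false = false ∧ par nums x = p) ↔
            QEq nums p (k + 1) x := by
        intro x
        constructor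
        · rintro ⟨hxS, hxs, hxp⟩
          rw [hSdef, List.mem_flatMap] at hxS
          obtain ⟨w, hwfr, hx⟩ := hxS
          have hiw := hfrin w hwfr
          have hwn : w.toNat < nums.length := by obtain ⟨h1, h2⟩ := hiw; omega
          obtain ⟨hix, hjx⟩ := (mem_buildRev hwn).mp hx
          have hcw : ((w.toNat : Nat) : Int) = w := by obtain ⟨h1, _⟩ := hiw; omega
          rw [hcw] at hjx
          have hQw : QEq nums p k w := (hfr w).mp hwfr
          have hxn : x.toNat < nums.length := by obtain ⟨h1, h2⟩ := hix; omega
          have hcx : ((x.toNat : Nat) : Int) = x := by obtain ⟨h1, _⟩ := hix; omega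
          refine ⟨⟨hix, hxp, ?_⟩, ?_⟩
          · rcases hjx with hj | hj
            · exact Or.inl ⟨hj ▸ qp_inR hQw.1, hj ▸ hQw.1⟩
            · exact Or.inr ⟨hj ▸ qp_inR hQw.1, hj ▸ hQw.1⟩
          · intro m hm hQp
            have : seen.getD x.toNat false = true :=
              (hseen x.toNat hxn).mpr ⟨m, by omega, by rw [hcx]; exact hQp⟩
            rw [hxs] at this
            simp at this
        · intro hQ
          have hix : inR nums x := qp_inR hQ.1
          have hxn : x.toNat < nums.length := by obtain ⟨h1, h2⟩ := hix; omega
          have hcx : ((x.toNat : Nat) : Int) = x := by obtain ⟨h1, _⟩ := hix; omega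
          obtain ⟨u', hju, hiu, hQu⟩ := qp_pred_min hQ
          have hun : u'.toNat < nums.length := by obtain ⟨h1, h2⟩ := hiu; omega
          have hcu : ((u'.toNat : Nat) : Int) = u' := by obtain ⟨h1, _⟩ := hiu; omega
          refine ⟨?_, ?_, qp_par hQ.1⟩
          · rw [hSdef, List.mem_flatMap]
            refine ⟨u', (hfr u').mpr hQu, ?_⟩
            exact (mem_buildRev hun).mpr ⟨hix, by rw [hcu]; exact hju⟩
          · by_contra hb
            have : seen.getD x.toNat false = true := by
              cases hx : seen.getD x.toNat false
              · exact absurd hx hb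
              · rfl
            obtain ⟨m, hm, hQp⟩ := (hseen x.toNat hxn).mp this
            rw [hcx] at hQp
            exact hQ.2 m (by omega) hQp
      have hred : loopB nums p (buildRev nums) (fuel + 1) (v :: fr') seen ans (k : Int) =
          loopB nums p (buildRev nums) fuel
            (S.foldl (stepB nums p ((k : Int) + 1)) (seen, ans, [])).2.2
            (S.foldl (stepB nums p ((k : Int) + 1)) (seen, ans, [])).1
            (S.foldl (stepB nums p ((k : Int) + 1)) (seen, ans, [])).2.1 ((k : Int) + 1) := by
        simp only [loopB]
        rw [hcollapse]
      rw [hred]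
      have hcast : ((k : Int) + 1) = ((k + 1 : Nat) : Int) := by push_cast; ring
      rw [hcast] at c1 c2 c3 c4 c5 c6 c7 ⊢
      by_cases hend : (S.foldl (stepB nums p ((k + 1 : Nat) : Int)) (seen, ans, [])).2.2 = []
      · -- no node of level k+1 exists: the next call returns immediately
        have hnone1 : ∀ x, ¬ QEq nums p (k + 1) x := by
          intro x hx
          have hmem := (c5 x).mpr (Or.inr ((hchar x).mpr hx))
          rw [hend] at hmem
          simp at hmem
        have hnone : ∀ m, k + 1 ≤ m → ∀ x, ¬ QEq nums p m x := by
          intro m hm x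
          have := qEq_levels_die hnone1 (m - (k + 1)) x
          have harith : (k + 1) + (m - (k + 1)) = m := by omega
          rw [harith] at this
          exact this
        rw [hend, loopB_empty]
        refine ⟨c2, ?_, ?_⟩
        · intro j hj m hm1 hQ
          rcases Nat.lt_or_ge m (k + 1) with hlt | hge
          · rw [c4 j hj, if_neg (fun hg => hnone1 (j : Int) ((hchar (j : Int)).mp
              ⟨hg.2.1, hg.1, hg.2.2⟩))]
            exact hans1 j hj m hm1 (by omega) hQ
          · exact absurd hQ (hnone m hge _)
        · intro j hj hno
          rw [c4 j hj, if_neg (fun hg => hnone1 (j : Int) ((hchar (j : Int)).mp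
            ⟨hg.2.1, hg.1, hg.2.2⟩))]
          exact hans2 j hj (fun m hm1 _ => hno m hm1)
      · -- recurse one level up
        obtain ⟨x0, hx0⟩ := List.exists_mem_of_ne_nil _ hend
        apply IH (k + 1)
        · exact c1
        · exact c2
        · -- seen characterization at level k+1
          intro j hj
          rw [c3 j hj]
          constructor
          · rintro (h | ⟨hm, hp⟩)
            · obtain ⟨m, hmk, hQp⟩ := (hseen j hj).mp h
              exact ⟨m, by omega, hQp⟩
            · by_cases hsj : seen.getD j false = true
              · obtain ⟨m, hmk, hQp⟩ := (hseen j hj).mp hsj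
                exact ⟨m, by omega, hQp⟩
              · have hsf : seen.getD j false = false := by
                  cases hx : seen.getD j false
                  · rfl
                  · exact absurd hx hsj
                have hQ := (hchar (j : Int)).mp ⟨hm, by
                  have : ((j : Int)).toNat = j := by omega
                  rw [this]; exact hsf, hp⟩
                exact ⟨k + 1, le_refl _, hQ.1⟩
          · rintro ⟨m, hm, hQp⟩
            obtain ⟨m', hm', hQE⟩ := qp_min hQp
            rcases Nat.lt_or_ge m' (k + 1) with hlt | hge
            · exact Or.inl ((hseen j hj).mpr ⟨m', by omega, hQE.1⟩)
            · have hmk : m' = k + 1 := by omega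
              obtain ⟨hS', hsf, hp'⟩ := (hchar (j : Int)).mpr (hmk ▸ hQE)
              exact Or.inr ⟨hS', hp'⟩
        · -- frontier characterization at level k+1
          intro x
          rw [c5 x]
          simp only [List.mem_nil_iff, false_or]
          exact hchar x
        · exact c6
        · -- answers set so far, levels 1..k+1
          intro j hj m hm1 hmk hQ
          rw [c4 j hj]
          rcases Nat.lt_or_ge m (k + 1) with hlt | hge
          · rw [if_neg]
            · exact hans1 j hj m hm1 (by omega) hQ
            · rintro ⟨hsf, hmm, hpp⟩
              have : seen.getD j false = true :=
                (hseen j hj).mpr ⟨m, by omega, hQ.1⟩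
              rw [hsf] at this
              simp at this
          · have hmk1 : m = k + 1 := by omega
            subst hmk1
            obtain ⟨hS', hsf, hp'⟩ := (hchar (j : Int)).mpr hQ
            rw [if_pos ⟨by
              have : ((j : Int)).toNat = j := by omega
              rw [this] at hsf; exact hsf, hS', hp'⟩]
        · -- untouched entries
          intro j hj hno
          rw [c4 j hj, if_neg (fun hg => hno (k + 1) (by omega) (by omega) ((hchar (j : Int)).mp
            ⟨hg.2.1, hg.1, hg.2.2⟩))]
          exact hans2 j hj (fun m hm1 hmk => hno m hm1 (by omega))
        · -- fuel: at least one fresh node was marked this round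
          have hx0S : x0 ∈ S ∧ seen.getD x0.toNat false = false ∧ par nums x0 = p := by
            have := (c5 x0).mp hx0
            simpa using this
          have hix0 : inR nums x0 := hS x0 hx0S.1
          have hx0n : x0.toNat < nums.length := by obtain ⟨h1, h2⟩ := hix0; omega
          have hlt := countP_lt_of_witness
            (l := List.range nums.length)
            (p := fun j => seen.getD j false)
            (q := fun j => (S.foldl (stepB nums p ((k + 1 : Nat) : Int)) (seen, ans, [])).1.getD j false)
            (fun j hjr hsj => by
              rw [c3 j (List.mem_range.mp hjr)]
              exact Or.inl hsj)
            (List.mem_range.mpr hx0n) hx0S.2.1 (c7 x0 hx0)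
          omega

-- ---------- B-side: relaxB and solve_alt ----------
theorem relaxB_spec {nums : List Int} {p : Int} (ans0 : List Int)
    (hal : ans0.length = nums.length) :
    (relaxB nums p (buildRev nums) ans0).length = nums.length ∧
    (∀ j : Nat, j < nums.length → ∀ m : Nat, 1 ≤ m → QEq nums p m (j : Int) →
      (relaxB nums p (buildRev nums) ans0).getD j 0 = (m : Int)) ∧
    (∀ j : Nat, j < nums.length → (∀ m : Nat, 1 ≤ m → ¬ QEq nums p m (j : Int)) →
      (relaxB nums p (buildRev nums) ans0).getD j 0 = ans0.getD j 0) := by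
  have hspec := loopB_spec (nums := nums) (p := p) ans0 (nums.length + 1) 0
    ((List.range nums.length).filterMap (fun (v : Nat) =>
      if PySem.Int.mod (nget nums (v : Int)) 2 ≠ p then some (v : Int) else none))
    ((List.range nums.length).map (fun (v : Nat) => decide (PySem.Int.mod (nget nums (v : Int)) 2 ≠ p)))
    ans0
    (by simp)
    hal
    (by
      intro j hj
      have hg : ((List.range nums.length).map (fun (v : Nat) =>
          decide (PySem.Int.mod (nget nums (v : Int)) 2 ≠ p))).getD j false =
          decide (PySem.Int.mod (nget nums (j : Int)) 2 ≠ p) := by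
        simp [List.getD_eq_getElem?_getD, List.getElem?_map, List.getElem?_range, hj]
      rw [hg]
      constructor
      · intro h
        refine ⟨0, le_refl _, ⟨⟨by omega, by omega⟩, by simpa [par] using h⟩⟩
      · rintro ⟨m, hm, hQp⟩
        have hm0 : m = 0 := by omega
        subst hm0
        simpa [par] using hQp.2)
    (by
      intro v
      simp only [List.mem_filterMap, List.mem_range]
      constructor
      · rintro ⟨vn, hvn, hsome⟩
        split_ifs at hsome with hc
        · simp at hsome
          subst hsome
          exact ⟨⟨⟨by omega, by omega⟩, by simpa [par] using hc⟩,
            fun m hm => absurd hm (Nat.not_lt_zero m)⟩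
      · rintro ⟨⟨⟨h0, hlt⟩, hpar⟩, _⟩
        refine ⟨v.toNat, by omega, ?_⟩
        rw [if_pos (by
          have : ((v.toNat : Nat) : Int) = v := by omega
          rw [this]
          simpa [par] using hpar)]
        simp [Int.toNat_of_nonneg h0])
    (by
      apply List.Nodup.filterMap _ List.nodup_range
      intro a a' b hb hb'
      split_ifs at hb hb' <;> simp at hb hb'
      omega)
    (by intro j hj m hm1 hm0 _; omega)
    (by intro j hj _; rfl)
    (by omega)
  simp only [Nat.cast_zero] at hspec
  exact hspec

-- parity is always 0 or 1
theorem par01 (nums : List Int) (v : Int) : par nums v = 0 ∨ par nums v = 1 := by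
  have h1 := PySem.Int.mod_nonneg (nget nums v) (b := 2) (by norm_num)
  have h2 := PySem.Int.mod_lt (nget nums v) (b := 2) (by norm_num)
  unfold par
  omega

-- a node of the wrong parity has no positive escape level for that parity
theorem qEq_wrong_par {nums : List Int} {p v : Int} (hne : par nums v ≠ p) :
    ∀ m : Nat, 1 ≤ m → ¬ QEq nums p m v := by
  intro m hm hQ
  cases m with
  | zero => omega
  | succ m' => exact hne (qp_par hQ.1)

theorem solve_alt_char {nums : List Int} :
    (solve_alt nums).length = nums.length ∧
    ∀ j : Nat, j < nums.length →
      ((∀ m : Nat, 1 ≤ m → ¬ QEq nums (par nums (j : Int)) m (j : Int)) →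
        (solve_alt nums).getD j 0 = -1) ∧
      (∀ m : Nat, 1 ≤ m → QEq nums (par nums (j : Int)) m (j : Int) →
        (solve_alt nums).getD j 0 = (m : Int)) := by
  obtain ⟨l0, s0, u0⟩ := relaxB_spec (nums := nums) (p := 0)
    (List.replicate nums.length (-1)) (by simp)
  obtain ⟨l1, s1, u1⟩ := relaxB_spec (nums := nums) (p := 1)
    (relaxB nums 0 (buildRev nums) (List.replicate nums.length (-1))) l0
  have hrepl : ∀ j : Nat, j < nums.length →
      (List.replicate nums.length (-1 : Int)).getD j 0 = -1 := by
    intro j hj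
    simp [List.getD_eq_getElem?_getD, List.getElem?_replicate, hj]
  refine ⟨l1, ?_⟩
  intro j hj
  rcases par01 nums (j : Int) with hp | hp
  · constructor
    · intro hno
      rw [show solve_alt nums = relaxB nums 1 (buildRev nums)
          (relaxB nums 0 (buildRev nums) (List.replicate nums.length (-1))) from rfl]
      rw [u1 j hj (qEq_wrong_par (by rw [hp]; norm_num))]
      rw [u0 j hj (fun m hm hQ => hno m hm (hp ▸ hQ))]
      exact hrepl j hj
    · intro m hm hQ
      rw [show solve_alt nums = relaxB nums 1 (buildRev nums)
          (relaxB nums 0 (buildRev nums) (List.replicate nums.length (-1))) from rfl]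
      rw [u1 j hj (qEq_wrong_par (by rw [hp]; norm_num))]
      exact s0 j hj m hm (hp ▸ hQ)
  · constructor
    · intro hno
      rw [show solve_alt nums = relaxB nums 1 (buildRev nums)
          (relaxB nums 0 (buildRev nums) (List.replicate nums.length (-1))) from rfl]
      rw [u1 j hj (fun m hm hQ => hno m hm (hp ▸ hQ))]
      rw [u0 j hj (qEq_wrong_par (by rw [hp]; norm_num))]
      exact hrepl j hj
    · intro m hm hQ
      rw [show solve_alt nums = relaxB nums 1 (buildRev nums)
          (relaxB nums 0 (buildRev nums) (List.replicate nums.length (-1))) from rfl]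
      exact s1 j hj m hm (hp ▸ hQ)

-- ===== VERDICT (by name: the statement is the Claim_ definition above) =====
theorem solve_spec : Claim_equal_solve := by
  intro nums _
  unfold Spec_solve
  obtain ⟨lB, hB⟩ := solve_alt_char (nums := nums)
  have lA : (solve nums).length = nums.length := by
    simp [solve]
  apply List.ext_getElem (by rw [lA, lB])
  intro j h1 h2
  rw [← List.getD_eq_getElem (solve nums) 0 h1, ← List.getD_eq_getElem (solve_alt nums) 0 h2]
  have hj : j < nums.length := by rw [lA] at h1; exact h1
  have hsolve : (solve nums).getD j 0 = bfsA nums (j : Int) := by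
    simp [solve, List.getD_eq_getElem?_getD, List.getElem?_map, List.getElem?_range, hj]
  rw [hsolve]
  have hi : inR nums (j : Int) := ⟨by omega, by omega⟩
  obtain ⟨hA1, hA2⟩ := hB j hj
  by_cases hex : ∃ k, Qp nums (par nums (j : Int)) k (j : Int)
  · obtain ⟨k0, hk0, hmin⟩ := nat_exists_min hex
    have hQE : QEq nums (par nums (j : Int)) k0 (j : Int) := ⟨hk0, hmin⟩
    have hk01 : 1 ≤ k0 := by
      rcases Nat.eq_zero_or_pos k0 with h0 | h0
      · subst h0
        exact absurd rfl hk0.2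
      · exact h0
    rw [bfsA_eq_of_QEq hi hQE, hA2 k0 hk01 hQE]
  · rw [bfsA_eq_neg_one hi (fun k hk => hex ⟨k, hk⟩), hA1 (fun m _ hQ => hex ⟨m, hQ.1⟩)]
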